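-- pv_equiv track=rewrite | github.com/zhouli121018/core | linuxOperation/app/utils/dept_session.py | remove_repeat_departmentids
-- ===== SOURCE A (Python) =====
-- def remove_repeat_departmentids(dataDept, department_ids=None):
--     if not department_ids:
--         return []
--     d = []
--     for dpt_id in department_ids:
--         if dpt_id not in dataDept: continue
--         parent_id = dataDept[dpt_id]['parent']
--         dpt_id = loop_remove_repeat_departmentids(dpt_id, parent_id, department_ids, dataDept)
--         if dpt_id:
--             d.append(dpt_id)
--     return d
--
-- def loop_remove_repeat_departmentids(dpt_id, parent_id, department_ids, dataDept):
--     """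
--     删除部门重复（子部门是否包含在父部门中）
--     :param obj:
--     :param dpt_id:
--     :param department_ids:
--     :return:
--     """
--     if parent_id in (0, -1):
--         return dpt_id
--     if parent_id in department_ids:
--         return None
--     if parent_id not in dataDept:
--         return dpt_id
--     parent_id = dataDept[parent_id]['parent']
--     return loop_remove_repeat_departmentids(dpt_id, parent_id, department_ids, dataDept)
-- ===== SOURCE B (Python) =====
-- def remove_repeat_departmentids(dataDept, department_ids=None):
--     # B: first flatten the nested dicts into a plain child -> parent map, then
--     # decide each id with an iterative, cycle-safe walk over that map (A decides
--     # via a recursive helper that re-reads the nested dicts at every step).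
--     if not department_ids:
--         return []
--     parent_of = {k: v['parent'] for k, v in dataDept.items() if 'parent' in v}
--     d = []
--     for dpt_id in department_ids:
--         if dpt_id not in dataDept:
--             continue
--         p = parent_of[dpt_id]
--         keep = True
--         seen = set()
--         while p not in (0, -1):
--             if p in department_ids:
--                 keep = False
--                 break
--             if p not in parent_of:
--                 break
--             if p in seen:
--                 break  # parent cycle with no listed member: nothing can drop dpt_id
--             seen.add(p)
--             p = parent_of[p]
--         if keep and dpt_id:
--             d.append(dpt_id)
--     return d
-- ===== Notes on version B (the rewrite author's own statement) =====
-- stated objective: alternative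
-- what changed: A decides keep/drop inside a recursive helper that re-reads the nested per-department dicts at every ancestor step; B first flattens dataDept into a plain child->parent dict in one pass and then runs an iterative, cycle-safe walk with a visited set over that map, returning a keep flag.
import Mathlib
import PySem

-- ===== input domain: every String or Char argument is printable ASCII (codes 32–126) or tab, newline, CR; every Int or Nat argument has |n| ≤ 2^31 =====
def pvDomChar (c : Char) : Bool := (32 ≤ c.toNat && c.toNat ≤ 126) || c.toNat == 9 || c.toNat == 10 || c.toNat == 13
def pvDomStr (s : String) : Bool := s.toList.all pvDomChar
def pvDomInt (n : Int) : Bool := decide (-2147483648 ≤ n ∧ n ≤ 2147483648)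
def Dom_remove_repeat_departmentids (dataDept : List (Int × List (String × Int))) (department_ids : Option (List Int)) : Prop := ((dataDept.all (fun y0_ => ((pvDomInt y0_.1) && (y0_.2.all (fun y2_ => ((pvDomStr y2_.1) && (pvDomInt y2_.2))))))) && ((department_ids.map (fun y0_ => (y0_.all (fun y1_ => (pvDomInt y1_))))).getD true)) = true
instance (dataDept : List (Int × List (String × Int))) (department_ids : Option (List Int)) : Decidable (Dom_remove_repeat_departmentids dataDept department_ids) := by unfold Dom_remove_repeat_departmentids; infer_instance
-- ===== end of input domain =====

-- B flattens dataDept into a plain child->parent dict once, then decides each id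
-- with an iterative cycle-safe walk over that map (A recurses over the nested
-- dicts); equivalence is about the return value, neither mutates its arguments.

-- ===== PORT A =====
-- port of loop_remove_repeat_departmentids; fuel dataDept.length + 2 bounds the
-- unbounded Python recursion (inside Pre_ the walk cuts before the fuel runs out;
-- where Python raises — KeyError on a missing 'parent', RecursionError on an
-- uncut parent cycle — the port returns junk and Pre_ excludes the input).
def pyLoopA (dataDept : List (Int × List (String × Int))) (ids : List Int) :
    Nat → Int → Int → Option Int
  | 0, _, _ => none
  | f + 1, dpt_id, parent_id =>
    if parent_id = 0 ∨ parent_id = -1 then some dpt_id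
    else if ids.contains parent_id then none
    else
      match dataDept.lookup parent_id with
      | none => some dpt_id
      | some v =>
        match v.lookup "parent" with
        | none => none                       -- Python: KeyError (outside Pre_)
        | some q => pyLoopA dataDept ids f dpt_id q

def remove_repeat_departmentids (dataDept : List (Int × List (String × Int))) (department_ids : Option (List Int)) : List Int :=
  match department_ids with
  | none => []
  | some ids =>
    if ids.isEmpty then []
    else
      ids.foldl (fun d dpt_id =>
        match dataDept.lookup dpt_id with
        | none => d                          -- 'dpt_id not in dataDept: continue'
        | some v =>
          match v.lookup "parent" with
          | none => d                        -- Python: KeyError (outside Pre_)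
          | some parent_id =>
            match pyLoopA dataDept ids (dataDept.length + 2) dpt_id parent_id with
            | none => d
            | some r => if r = 0 then d else d ++ [r]) []   -- 'if dpt_id:' (0 falsy)

-- ===== PORT B =====
-- the dict comprehension {k: v['parent'] for k, v in dataDept.items() if 'parent' in v}
def buildParents (dataDept : List (Int × List (String × Int))) : PySem.Dict Int Int :=
  dataDept.foldl (fun m kv =>
    match kv.2.lookup "parent" with
    | some p => m.insert kv.1 p
    | none => m) PySem.Dict.empty

-- the 'while p not in (0, -1)' loop with its visited set; returns the keep flag.
-- Fuel dataDept.length + 2 is enough for the seen-guarded Python loop whenever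
-- dataDept has distinct keys (each continuing step adds a fresh key to seen).
def bKeep (pm : PySem.Dict Int Int) (ids : List Int) :
    Nat → Int → PySem.Set Int → Bool
  | 0, _, _ => true
  | f + 1, p, seen =>
    if p = 0 ∨ p = -1 then true
    else if ids.contains p then false
    else
      match pm.get? p with
      | none => true
      | some q =>
        if PySem.Set.contains seen p then true
        else bKeep pm ids f q (PySem.Set.add seen p)

def remove_repeat_departmentids_alt (dataDept : List (Int × List (String × Int))) (department_ids : Option (List Int)) : List Int :=
  match department_ids with
  | none => []
  | some ids =>
    if ids.isEmpty then []
    else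
      let pm := buildParents dataDept
      ids.foldl (fun d dpt_id =>
        if (dataDept.lookup dpt_id).isNone then d
        else
          match pm.get? dpt_id with
          | none => d                        -- Python: KeyError (outside Pre_)
          | some p =>
            if bKeep pm ids (dataDept.length + 2) p PySem.Set.empty && decide (dpt_id ≠ 0)
            then d ++ [dpt_id] else d) []

-- ===== PRECONDITION & SPEC =====
-- chainOKv walks the parent chain exactly as A does, carrying the set of visited
-- nodes: it is true iff A's recursion from p terminates (reaches a root 0/-1, a
-- listed id, or a key outside dataDept) with every visited entry carrying a
-- 'parent' field; false where Python A raises KeyError or RecursionError.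
def chainOKv (dataDept : List (Int × List (String × Int))) (ids : List Int) :
    Nat → Int → List Int → Bool
  | 0, _, _ => false
  | f + 1, p, vis =>
    if p = 0 ∨ p = -1 then true
    else if ids.contains p then true
    else
      match dataDept.lookup p with
      | none => true
      | some v =>
        match v.lookup "parent" with
        | none => false
        | some q => if vis.contains p then false else chainOKv dataDept ids f q (vis ++ [p])

def startOK (dataDept : List (Int × List (String × Int))) (ids : List Int) (i : Int) : Bool :=
  match dataDept.lookup i with
  | none => true
  | some v =>
    match v.lookup "parent" with
    | none => false
    | some p => chainOKv dataDept ids (dataDept.length + 2) p []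

-- Pre_ excludes exactly (a) inputs on which Python A raises: KeyError when the
-- walk visits an entry without a 'parent' field, RecursionError on a parent
-- cycle not cut by a root, a listed id, or a missing key; and (b) association
-- lists with duplicate keys, which no Python dict dataDept can produce.
def Pre_remove_repeat_departmentids (dataDept : List (Int × List (String × Int))) (department_ids : Option (List Int)) : Prop :=
  (dataDept.map Prod.fst).Nodup ∧
  (department_ids.getD []).all (startOK dataDept (department_ids.getD [])) = true
instance (dataDept : List (Int × List (String × Int))) (department_ids : Option (List Int)) : Decidable (Pre_remove_repeat_departmentids dataDept department_ids) := by unfold Pre_remove_repeat_departmentids; infer_instance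

def pvWitness_remove_repeat_departmentids : (List (Int × List (String × Int))) × Option (List Int) :=
  ([(1, [("parent", 0)]), (2, [("parent", 1)]), (3, [("parent", 7)])], some [1, 2, 3])

def Spec_remove_repeat_departmentids (dataDept : List (Int × List (String × Int))) (department_ids : Option (List Int)) (out : List Int) : Prop := out = remove_repeat_departmentids_alt dataDept department_ids
instance (dataDept : List (Int × List (String × Int))) (department_ids : Option (List Int)) (out : List Int) : Decidable (Spec_remove_repeat_departmentids dataDept department_ids out) := by unfold Spec_remove_repeat_departmentids; infer_instance

-- ===== CLAIM (what is proved, stated in full; the proofs are below) =====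
def Claim_equal_remove_repeat_departmentids : Prop := ∀ (dataDept : List (Int × List (String × Int))) (department_ids : Option (List Int)), Dom_remove_repeat_departmentids dataDept department_ids → Pre_remove_repeat_departmentids dataDept department_ids → Spec_remove_repeat_departmentids dataDept department_ids (remove_repeat_departmentids dataDept department_ids)

-- ===== LEMMAS AND PROOFS =====

-- the flattened map looks up exactly 'parent' of the first matching entry
theorem buildParents_go (step : PySem.Dict Int Int → (Int × List (String × Int)) → PySem.Dict Int Int)
    (hstep : step = fun m kv => match kv.2.lookup "parent" with
      | some p => m.insert kv.1 p
      | none => m) :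
    ∀ (l : List (Int × List (String × Int))) (m : PySem.Dict Int Int),
      (l.map Prod.fst).Nodup → (∀ kv ∈ l, m.contains kv.1 = false) →
      ∀ k, (l.foldl step m).get? k =
        match l.lookup k with
        | some v => v.lookup "parent"
        | none => m.get? k := by
  intro l
  induction l with
  | nil => intro m _ _ k; simp
  | cons a rest ih =>
    intro m hnd hfresh k
    have hfa : m.contains a.1 = false := hfresh a (List.mem_cons_self ..)
    have hnd' : (rest.map Prod.fst).Nodup := by simpa using hnd.of_cons
    have hamem : a.1 ∉ rest.map Prod.fst := by
      have := (List.nodup_cons.mp (by simpa using hnd : (a.1 :: rest.map Prod.fst).Nodup)).1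
      exact this
    have hfresh' : ∀ kv ∈ rest, (step m a).contains kv.1 = false := by
      intro kv hkv
      have hne : kv.1 ≠ a.1 := by
        intro h; exact hamem (h ▸ List.mem_map_of_mem hkv)
      subst hstep
      cases hp : a.2.lookup "parent" with
      | none => simpa [hp] using hfresh kv (List.mem_cons_of_mem _ hkv)
      | some p =>
        simp only [hp]
        rw [PySem.Dict.contains_insert]
        simp [hne, hfresh kv (List.mem_cons_of_mem _ hkv)]
    rw [List.foldl_cons, ih (step m a) hnd' hfresh']
    by_cases hk : a.1 = k
    · subst hk
      have hrest : rest.lookup a.1 = none := by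
        rw [List.lookup_eq_none_iff]
        intro b hb
        have : b.1 ≠ a.1 := by
          intro h; exact hamem (h ▸ List.mem_map_of_mem hb)
        simpa using fun h => this h.symm
      subst hstep
      cases hp : a.2.lookup "parent" with
      | none =>
        have : m.get? a.1 = none := by
          rw [← PySem.Dict.get?_eq_none_iff_contains] at hfa; exact hfa
        simp [List.lookup, hrest, hp, this]
      | some p => simp [List.lookup, hrest, hp, PySem.Dict.get?_insert_self]
    · have hl : (a :: rest).lookup k = rest.lookup k := by
        have hb : (k == a.1) = false := by
          simp only [beq_eq_false_iff_ne, ne_eq]; intro h; exact hk h.symm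
        simp only [List.lookup, hb]
      rw [hl]
      cases hr : rest.lookup k with
      | some v => simp
      | none =>
        subst hstep
        cases hp : a.2.lookup "parent" with
        | none => simp [hp]
        | some p =>
          simp only [hp]
          apply PySem.Dict.get?_insert_of_ne
          intro h; exact hk h.symm

theorem buildParents_get? (dataDept : List (Int × List (String × Int)))
    (hnd : (dataDept.map Prod.fst).Nodup) (k : Int) :
    (buildParents dataDept).get? k =
      match dataDept.lookup k with
      | some v => v.lookup "parent"
      | none => none := by
  have h := buildParents_go _ rfl dataDept PySem.Dict.empty hnd
    (by intro kv _; simp) k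
  unfold buildParents
  rw [h]
  cases dataDept.lookup k with
  | none => simp
  | some v => rfl

-- core correspondence: on a chain chainOKv certifies, A's recursive cut walk and
-- B's iterative seen-guarded walk agree
theorem loopA_eq_bKeep (dataDept : List (Int × List (String × Int))) (ids : List Int)
    (hnd : (dataDept.map Prod.fst).Nodup) :
    ∀ (f : Nat) (p : Int) (vis : List Int) (dpt : Int),
      chainOKv dataDept ids f p vis = true →
      pyLoopA dataDept ids f dpt p =
        (if bKeep (buildParents dataDept) ids f p vis then some dpt else none) := by
  intro f
  induction f with
  | zero => intro p vis dpt h; simp [chainOKv] at h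
  | succ f ih =>
    intro p vis dpt h
    by_cases hr : p = 0 ∨ p = -1
    · simp [pyLoopA, bKeep, hr]
    · by_cases hin : ids.contains p = true
      · have hmem : p ∈ ids := by simpa using hin
        simp [pyLoopA, bKeep, hr, hmem]
      · have hin' : ids.contains p = false := by simpa using hin
        have hnmem : p ∉ ids := by simpa using hin
        simp only [chainOKv, if_neg hr, hin', Bool.false_eq_true, if_false] at h
        cases hd : dataDept.lookup p with
        | none =>
          simp [pyLoopA, bKeep, hr, hnmem, hd, buildParents_get? dataDept hnd p]
        | some v =>
          simp only [hd] at h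
          cases hp : v.lookup "parent" with
          | none => simp [hp] at h
          | some q =>
            simp only [hp] at h
            have hsplit : p ∉ vis ∧ chainOKv dataDept ids f q (vis ++ [p]) = true := by
              by_cases hv : p ∈ vis
              · simp [hv] at h
              · simp [hv] at h; exact ⟨hv, h⟩
            have hvmem : p ∉ vis := hsplit.1
            have hvc : vis.contains p = false := by simpa using hvmem
            have hpm : (buildParents dataDept).get? p = some q := by
              simp [buildParents_get? dataDept hnd p, hd, hp]
            simp [pyLoopA, bKeep, hr, hnmem, hd, hp, hpm,
              PySem.Set.contains, PySem.Set.add, hvmem,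
              ih q (vis ++ [p]) dpt hsplit.2]

-- ===== VERDICT (by name: the statement is the Claim_ definition above) =====
theorem remove_repeat_departmentids_spec : Claim_equal_remove_repeat_departmentids := by
  intro dataDept department_ids _ hpre
  unfold Spec_remove_repeat_departmentids
  obtain ⟨hnd, hall⟩ := hpre
  cases department_ids with
  | none => rfl
  | some ids =>
    unfold remove_repeat_departmentids remove_repeat_departmentids_alt
    by_cases he : ids.isEmpty
    · simp [he]
    · simp only [if_neg he]
      apply PySem.List.foldl_congr_mem
      intro d i hi
      have hs : startOK dataDept ids i = true := by
        simp only [Option.getD, List.all_eq_true] at hall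
        exact hall i hi
      unfold startOK at hs
      cases hd : dataDept.lookup i with
      | none => simp
      | some v =>
        simp only [hd] at hs ⊢
        cases hp : v.lookup "parent" with
        | none => simp [hp] at hs
        | some p =>
          simp only [hp] at hs
          have hpm : (buildParents dataDept).get? i = some p := by
            simp [buildParents_get? dataDept hnd i, hd, hp]
          simp only [loopA_eq_bKeep dataDept ids hnd (dataDept.length + 2) p [] i hs,
            hpm, PySem.Set.empty, Option.isNone_some, Bool.false_eq_true, if_false]
          by_cases hb : bKeep (buildParents dataDept) ids (dataDept.length + 2) p [] = true
          · simp only [hb, if_true, Bool.true_and]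
            by_cases hz : i = 0 <;> simp [hz]
          · have hb' : bKeep (buildParents dataDept) ids (dataDept.length + 2) p [] = false := by
              simpa using hb
            simp [hb']
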